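-- pv_equiv track=rewrite | github.com/ARTHURVANBELLE/Algo_exam_ECAM | advent_of_code/day_2.py | safety_check_2
-- ===== SOURCE A (Python) =====
-- def safety_check_2(lines: list[list[int]]) -> int:
--     """
--     Analyzes a list of number sequences to find which sequences can become valid after removing
--     exactly one number. A valid sequence must be either strictly increasing or decreasing
--     with differences between consecutive numbers in the range [1,3].
--
--     Time Complexity: O(n * m^2) where:
--     - n is the number of lines/sequences
--     - m is the length of each sequence
--     The complexity comes from:
--     - Iterating through each line O(n)
--     - For each line, trying each possible deletion O(m)
--     - For each deletion, checking if sequence is valid O(m)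
--
--     Args:
--         lines (list[list[int]]): List of sequences to check, each sequence is a list of integers
--
--     Returns:
--         int: Count of sequences that can become valid after removing exactly one number
--     """
--     count = 0
--
--     for line in lines:
--         # Try removing each number once
--         for i in range(len(line)):
--             # Create new sequence without the number at position i
--             temp_line = line[:i] + line[i+1:]
--
--             # Check if sequence is valid increasing (differences between 1-3)
--             increasing = all((temp_line[i] - temp_line[i - 1]) in {1, 2, 3}
--                            for i in range(1, len(temp_line)))
--
--             # Check if sequence is valid decreasing (differences between 1-3)
--             decreasing = all((temp_line[i - 1] - temp_line[i]) in {1, 2, 3}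
--                            for i in range(1, len(temp_line)))
--
--             # If either condition is met, count this sequence and move to next
--             if increasing or decreasing:
--                 count += 1
--                 break  # Found a valid deletion, no need to check others
--
--     return count
-- ===== SOURCE B (Python) =====
-- def _deletable(line, sign):
--     """True iff removing some single element of `line` leaves a sequence whose
--     consecutive differences, multiplied by `sign`, all lie in [1, 3].
--     Uses prefix/suffix pair-validity arrays so each deletion is checked in O(1)."""
--     m = len(line)
--     n = m - 1  # number of adjacent pairs
--     good = [1 <= sign * (line[j + 1] - line[j]) <= 3 for j in range(n)]
--     pre = [True] * (n + 1)
--     for j in range(n):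
--         pre[j + 1] = pre[j] and good[j]
--     suf = [True] * (n + 1)
--     for j in range(n - 1, -1, -1):
--         suf[j] = suf[j + 1] and good[j]
--     for i in range(m):
--         left_ok = pre[i - 1] if i >= 1 else True
--         right_ok = suf[i + 1] if i + 1 <= n else True
--         bridge = True
--         if 0 < i < m - 1:
--             bridge = 1 <= sign * (line[i + 1] - line[i - 1]) <= 3
--         if left_ok and right_ok and bridge:
--             return True
--     return False
--
--
-- def safety_check_2(lines: list[list[int]]) -> int:
--     return sum(1 for line in lines if _deletable(line, 1) or _deletable(line, -1))
-- ===== Notes on version B (the rewrite author's own statement) =====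
-- stated objective: faster
-- what changed: A re-checks the whole shortened sequence for every candidate deletion (O(m^2) per line); B precomputes per-pair validity with prefix/suffix arrays and tests each deletion in O(1) via a single bridge difference (O(m) per line).
import Mathlib
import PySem

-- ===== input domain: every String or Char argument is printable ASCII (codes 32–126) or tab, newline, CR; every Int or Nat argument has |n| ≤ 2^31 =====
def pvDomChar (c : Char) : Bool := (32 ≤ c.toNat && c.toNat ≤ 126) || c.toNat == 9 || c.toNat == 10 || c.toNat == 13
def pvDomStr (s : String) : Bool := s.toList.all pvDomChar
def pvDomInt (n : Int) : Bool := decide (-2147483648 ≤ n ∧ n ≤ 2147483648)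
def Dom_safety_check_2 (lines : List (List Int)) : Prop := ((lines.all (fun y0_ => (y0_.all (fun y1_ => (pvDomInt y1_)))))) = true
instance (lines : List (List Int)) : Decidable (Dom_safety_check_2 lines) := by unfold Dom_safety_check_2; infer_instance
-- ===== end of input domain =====

-- B replaces A's try-every-deletion-and-rescan inner loops (O(m^2) per line) by prefix/suffix
-- pair-validity arrays plus an O(1) bridge test per deletion (O(m) per line); same return value.

-- ===== PORT A =====
-- all((temp[i] - temp[i-1]) in {1,2,3} for i in range(1, len(temp)))
def aInc (t : List Int) : Bool :=
  (PySem.List.pyRange 1 (t.length : Int) 1).all (fun i =>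
    let d := PySem.List.pyGetD t i 0 - PySem.List.pyGetD t (i - 1) 0
    d == 1 || d == 2 || d == 3)

-- all((temp[i-1] - temp[i]) in {1,2,3} for i in range(1, len(temp)))
def aDec (t : List Int) : Bool :=
  (PySem.List.pyRange 1 (t.length : Int) 1).all (fun i =>
    let d := PySem.List.pyGetD t (i - 1) 0 - PySem.List.pyGetD t i 0
    d == 1 || d == 2 || d == 3)

-- `for i in range(len(line)): … if increasing or decreasing: count += 1; break`
def aLoop (line : List Int) : List Int → Bool
  | [] => false
  | i :: rest =>
    let temp := PySem.List.slice line none (some i) ++ PySem.List.slice line (some (i + 1)) none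
    if aInc temp || aDec temp then true else aLoop line rest

def safety_check_2 (lines : List (List Int)) : Int :=
  lines.foldl (fun count line =>
    if aLoop line (PySem.List.pyRange 0 (line.length : Int) 1) then count + 1 else count) 0

-- ===== PORT B =====
-- good = [1 <= sign*(line[j+1]-line[j]) <= 3 for j in range(m-1)]
def altGood (line : List Int) (sign : Int) : List Bool :=
  (List.range (line.length - 1)).map (fun j =>
    decide (1 ≤ sign * (line.getD (j + 1) 0 - line.getD j 0) ∧
            sign * (line.getD (j + 1) 0 - line.getD j 0) ≤ 3))

-- pre[j+1] = pre[j] and good[j]   (pre[0] = True)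
def altPre (good : List Bool) : List Bool := good.scanl (fun b g => b && g) true

-- suf[j] = suf[j+1] and good[j]   (suf[n] = True), built back-to-front
def altSuf : List Bool → List Bool
  | [] => [true]
  | g :: gs => (g && (altSuf gs).headD true) :: altSuf gs

-- the `for i in range(m): … return True` scan of _deletable
def altCheck (line : List Int) (sign : Int) : Bool :=
  let m := line.length
  let n := m - 1
  let pre := altPre (altGood line sign)
  let suf := altSuf (altGood line sign)
  (List.range m).any (fun i =>
    (if 1 ≤ i then pre.getD (i - 1) true else true) &&
    (if i + 1 ≤ n then suf.getD (i + 1) true else true) &&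
    (if 0 < i ∧ i < m - 1 then
        decide (1 ≤ sign * (line.getD (i + 1) 0 - line.getD (i - 1) 0) ∧
                sign * (line.getD (i + 1) 0 - line.getD (i - 1) 0) ≤ 3)
      else true))

def safety_check_2_alt (lines : List (List Int)) : Int :=
  ((lines.countP (fun line => altCheck line 1 || altCheck line (-1)) : Nat) : Int)

-- ===== PRECONDITION & SPEC =====
def Spec_safety_check_2 (lines : List (List Int)) (out : Int) : Prop := out = safety_check_2_alt lines
instance (lines : List (List Int)) (out : Int) : Decidable (Spec_safety_check_2 lines out) := by unfold Spec_safety_check_2; infer_instance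

-- ===== CLAIM (what is proved, stated in full; the proofs are below) =====
def Claim_equal_safety_check_2 : Prop := ∀ (lines : List (List Int)), Dom_safety_check_2 lines → Spec_safety_check_2 lines (safety_check_2 lines)

-- ===== LEMMAS AND PROOFS =====

-- the step relation: consecutive difference, times `s`, lies in [1, 3]
def Rg (s a b : Int) : Prop := 1 ≤ s * (b - a) ∧ s * (b - a) ≤ 3

-- the list obtained by deleting index i
def del (l : List Int) (i : Nat) : List Int := l.take i ++ l.drop (i + 1)

theorem all_id_iff (l : List Bool) : l.all id = true ↔ ∀ j (h : j < l.length), l[j] = true := by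
  rw [List.all_eq_true]
  constructor
  · intro h j hj; exact h _ (l.getElem_mem hj)
  · intro h x hx
    obtain ⟨j, hj, rfl⟩ := List.mem_iff_getElem.mp hx
    exact h j hj

theorem aInc_iff (t : List Int) : aInc t = true ↔ List.IsChain (Rg 1) t := by
  unfold aInc
  rw [List.all_eq_true, List.isChain_iff_getElem]
  have key : ∀ (k : Nat) (hk : k + 1 < t.length),
      ((PySem.List.pyGetD t ((k + 1 : Nat) : Int) 0 - PySem.List.pyGetD t (((k + 1 : Nat) : Int) - 1) 0 == 1 ||
        PySem.List.pyGetD t ((k + 1 : Nat) : Int) 0 - PySem.List.pyGetD t (((k + 1 : Nat) : Int) - 1) 0 == 2 ||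
        PySem.List.pyGetD t ((k + 1 : Nat) : Int) 0 - PySem.List.pyGetD t (((k + 1 : Nat) : Int) - 1) 0 == 3) = true
       ↔ Rg 1 (t[k]'(by omega)) (t[k+1]'(by omega))) := by
    intro k hk
    simp only [show (((k + 1 : Nat)) : Int) - 1 = ((k : Nat) : Int) by push_cast; ring,
      PySem.List.pyGetD_natCast]
    rw [List.getD_eq_getElem t 0 hk, List.getD_eq_getElem t 0 (by omega)]
    simp only [Bool.or_eq_true, beq_iff_eq]
    unfold Rg; omega
  constructor
  · intro h k hk
    have h1 : (((k + 1 : Nat)) : Int) ∈ PySem.List.pyRange 1 (t.length : Int) 1 := by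
      rw [PySem.List.mem_pyRange_one]; constructor <;> [omega; exact_mod_cast by omega]
    have h2 := h _ h1
    simp only at h2
    exact (key k hk).mp h2
  · intro h i hi
    rw [PySem.List.mem_pyRange_one] at hi
    have hk : i.toNat - 1 + 1 < t.length := by omega
    have hi' : i = ((i.toNat - 1 + 1 : Nat) : Int) := by omega
    rw [hi']
    simp only
    exact (key (i.toNat - 1) hk).mpr (h _ hk)

theorem aDec_iff (t : List Int) : aDec t = true ↔ List.IsChain (Rg (-1)) t := by
  unfold aDec
  rw [List.all_eq_true, List.isChain_iff_getElem]
  have key : ∀ (k : Nat) (hk : k + 1 < t.length),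
      ((PySem.List.pyGetD t (((k + 1 : Nat) : Int) - 1) 0 - PySem.List.pyGetD t ((k + 1 : Nat) : Int) 0 == 1 ||
        PySem.List.pyGetD t (((k + 1 : Nat) : Int) - 1) 0 - PySem.List.pyGetD t ((k + 1 : Nat) : Int) 0 == 2 ||
        PySem.List.pyGetD t (((k + 1 : Nat) : Int) - 1) 0 - PySem.List.pyGetD t ((k + 1 : Nat) : Int) 0 == 3) = true
       ↔ Rg (-1) (t[k]'(by omega)) (t[k+1]'(by omega))) := by
    intro k hk
    simp only [show (((k + 1 : Nat)) : Int) - 1 = ((k : Nat) : Int) by push_cast; ring,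
      PySem.List.pyGetD_natCast]
    rw [List.getD_eq_getElem t 0 hk, List.getD_eq_getElem t 0 (by omega)]
    simp only [Bool.or_eq_true, beq_iff_eq]
    unfold Rg; omega
  constructor
  · intro h k hk
    have h1 : (((k + 1 : Nat)) : Int) ∈ PySem.List.pyRange 1 (t.length : Int) 1 := by
      rw [PySem.List.mem_pyRange_one]; constructor <;> [omega; exact_mod_cast by omega]
    have h2 := h _ h1
    simp only at h2
    exact (key k hk).mp h2
  · intro h i hi
    rw [PySem.List.mem_pyRange_one] at hi
    have hk : i.toNat - 1 + 1 < t.length := by omega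
    have hi' : i = ((i.toNat - 1 + 1 : Nat) : Int) := by omega
    rw [hi']
    simp only
    exact (key (i.toNat - 1) hk).mpr (h _ hk)

theorem aLoop_iff (line : List Int) (l : List Int) :
    aLoop line l = true ↔ ∃ i ∈ l,
      (aInc (PySem.List.slice line none (some i) ++ PySem.List.slice line (some (i + 1)) none)
       || aDec (PySem.List.slice line none (some i) ++ PySem.List.slice line (some (i + 1)) none)) = true := by
  induction l with
  | nil => simp [aLoop]
  | cons i rest ih =>
    simp only [aLoop, List.mem_cons]
    by_cases hb : (aInc (PySem.List.slice line none (some i) ++ PySem.List.slice line (some (i + 1)) none)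
        || aDec (PySem.List.slice line none (some i) ++ PySem.List.slice line (some (i + 1)) none)) = true
    · simp only [hb, if_true, true_iff]
      exact ⟨i, Or.inl rfl, hb⟩
    · rw [if_neg hb, ih]
      constructor
      · rintro ⟨j, hj, h⟩; exact ⟨j, Or.inr hj, h⟩
      · rintro ⟨j, rfl | hj, h⟩
        · exact absurd h hb
        · exact ⟨j, hj, h⟩

theorem a_char (line : List Int) :
    aLoop line (PySem.List.pyRange 0 (line.length : Int) 1) = true ↔
      ∃ k < line.length, List.IsChain (Rg 1) (del line k) ∨ List.IsChain (Rg (-1)) (del line k) := by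
  rw [aLoop_iff]
  constructor
  · rintro ⟨i, hi, h⟩
    rw [PySem.List.mem_pyRange_one] at hi
    have hi' : i = ((i.toNat : Nat) : Int) := by omega
    rw [hi', show ((i.toNat : Nat) : Int) + 1 = ((i.toNat + 1 : Nat) : Int) by push_cast; ring,
      PySem.List.slice_to_natCast, PySem.List.slice_from_natCast] at h
    rw [Bool.or_eq_true, aInc_iff, aDec_iff] at h
    exact ⟨i.toNat, by omega, h⟩
  · rintro ⟨k, hk, h⟩
    refine ⟨((k : Nat) : Int), by rw [PySem.List.mem_pyRange_one]; constructor <;> [omega; exact_mod_cast hk], ?_⟩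
    rw [show ((k : Nat) : Int) + 1 = ((k + 1 : Nat) : Int) by push_cast; ring,
      PySem.List.slice_to_natCast, PySem.List.slice_from_natCast]
    rw [Bool.or_eq_true, aInc_iff, aDec_iff]
    exact h

theorem altGood_length (line : List Int) (s : Int) : (altGood line s).length = line.length - 1 := by
  simp [altGood]

theorem altGood_getD (line : List Int) (s : Int) (j : Nat) (h : j + 1 < line.length) :
    ((altGood line s).getD j false = true) ↔ Rg s (line.getD j 0) (line.getD (j + 1) 0) := by
  unfold altGood
  rw [List.getD_eq_getElem _ _ (by simpa using by omega)]
  rw [List.getElem_map, List.getElem_range]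
  simp [Rg]

theorem altPre_getD (good : List Bool) (b : Bool) (k : Nat) (d : Bool) (h : k ≤ good.length) :
    (good.scanl (fun b g => b && g) b).getD k d = (b && (good.take k).all id) := by
  induction good generalizing b k with
  | nil =>
    have hk : k = 0 := by simpa using h
    subst hk; simp [List.scanl]
  | cons g gs ih =>
    rw [List.scanl_cons]
    cases k with
    | zero => simp
    | succ k =>
      rw [List.getD_cons_succ, ih (b && g) k (by simpa using h)]
      simp [Bool.and_assoc]

theorem altSuf_headD (good : List Bool) : (altSuf good).headD true = good.all id := by
  induction good with
  | nil => rfl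
  | cons g gs ih => rw [altSuf, List.headD_cons, ih, List.all_cons]; rfl

theorem altSuf_getD (good : List Bool) (k : Nat) :
    (altSuf good).getD k true = (good.drop k).all id := by
  induction good generalizing k with
  | nil => cases k <;> simp [altSuf]
  | cons g gs ih =>
    cases k with
    | zero => rw [altSuf, List.getD_cons_zero, altSuf_headD, List.drop_zero, List.all_cons]; rfl
    | succ k => rw [altSuf, List.getD_cons_succ, List.drop_succ_cons, ih]

theorem good_take_iff (line : List Int) (s : Int) (k : Nat) :
    ((altGood line s).take k).all id = true ↔ List.IsChain (Rg s) (line.take (k + 1)) := by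
  rw [all_id_iff, List.isChain_iff_getElem]
  constructor
  · intro h j hj
    rw [List.length_take] at hj
    have hjl : j + 1 < line.length := by omega
    have hjg : j < ((altGood line s).take k).length := by
      rw [List.length_take, altGood_length]; omega
    have := h j hjg
    rw [List.getElem_take, ← List.getD_eq_getElem _ false] at this
    rw [altGood_getD line s j hjl] at this
    rw [List.getElem_take, List.getElem_take,
      ← List.getD_eq_getElem line 0, ← List.getD_eq_getElem line 0]
    exact this
  · intro h j hj
    rw [List.length_take, altGood_length] at hj
    have hjl : j + 1 < line.length := by omega
    have hjt : j + 1 < (line.take (k + 1)).length := by rw [List.length_take]; omega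
    have := h j hjt
    rw [List.getElem_take, List.getElem_take] at this
    rw [List.getElem_take, ← List.getD_eq_getElem _ false, altGood_getD line s j hjl]
    rw [← List.getD_eq_getElem line 0, ← List.getD_eq_getElem line 0] at this
    exact this

theorem good_drop_iff (line : List Int) (s : Int) (k : Nat) :
    ((altGood line s).drop k).all id = true ↔ List.IsChain (Rg s) (line.drop k) := by
  rw [all_id_iff, List.isChain_iff_getElem]
  constructor
  · intro h j hj
    rw [List.length_drop] at hj
    have hjl : (k + j) + 1 < line.length := by omega
    have hjg : j < ((altGood line s).drop k).length := by
      rw [List.length_drop, altGood_length]; omega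
    have := h j hjg
    rw [List.getElem_drop, ← List.getD_eq_getElem _ false, altGood_getD line s (k + j) hjl] at this
    rw [List.getElem_drop, List.getElem_drop,
      ← List.getD_eq_getElem line 0, ← List.getD_eq_getElem line 0]
    rw [show k + (j + 1) = (k + j) + 1 by omega]
    exact this
  · intro h j hj
    rw [List.length_drop, altGood_length] at hj
    have hjl : (k + j) + 1 < line.length := by omega
    have hjt : j + 1 < (line.drop k).length := by rw [List.length_drop]; omega
    have := h j hjt
    rw [List.getElem_drop, List.getElem_drop] at this
    rw [List.getElem_drop, ← List.getD_eq_getElem _ false, altGood_getD line s (k + j) hjl]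
    rw [← List.getD_eq_getElem line 0, ← List.getD_eq_getElem line 0] at this
    rw [show k + (j + 1) = (k + j) + 1 by omega] at this
    exact this

theorem takeGetLast_eq (l : List Int) (i : Nat) (h0 : 0 < i) (h : i ≤ l.length) :
    (l.take i).getLast? = l[i - 1]? := by
  rw [List.getLast?_eq_getElem?, List.length_take, Nat.min_eq_left h, List.getElem?_take]
  simp [Nat.sub_lt h0]

theorem alt_inner (line : List Int) (s : Int) (i : Nat) (hi : i < line.length) :
    ((if 1 ≤ i then (altPre (altGood line s)).getD (i - 1) true else true) &&
     (if i + 1 ≤ line.length - 1 then (altSuf (altGood line s)).getD (i + 1) true else true) &&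
     (if 0 < i ∧ i < line.length - 1 then
        decide (1 ≤ s * (line.getD (i + 1) 0 - line.getD (i - 1) 0) ∧
                s * (line.getD (i + 1) 0 - line.getD (i - 1) 0) ≤ 3)
      else true)) = true ↔ List.IsChain (Rg s) (del line i) := by
  rw [del, List.isChain_append, Bool.and_eq_true, Bool.and_eq_true]
  have hA : (if 1 ≤ i then (altPre (altGood line s)).getD (i - 1) true else true) = true
      ↔ List.IsChain (Rg s) (line.take i) := by
    by_cases h1 : 1 ≤ i
    · rw [if_pos h1, altPre, altPre_getD _ true (i - 1) true (by rw [altGood_length]; omega),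
        Bool.true_and, good_take_iff, show i - 1 + 1 = i by omega]
    · rw [if_neg h1, show i = 0 by omega]
      simp
  have hB : (if i + 1 ≤ line.length - 1 then (altSuf (altGood line s)).getD (i + 1) true else true) = true
      ↔ List.IsChain (Rg s) (line.drop (i + 1)) := by
    by_cases h2 : i + 1 ≤ line.length - 1
    · rw [if_pos h2, altSuf_getD, good_drop_iff]
    · rw [if_neg h2, List.drop_eq_nil_of_le (by omega)]
      simp
  have hC : (if 0 < i ∧ i < line.length - 1 then
        decide (1 ≤ s * (line.getD (i + 1) 0 - line.getD (i - 1) 0) ∧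
                s * (line.getD (i + 1) 0 - line.getD (i - 1) 0) ≤ 3)
      else true) = true
      ↔ ∀ x ∈ (line.take i).getLast?, ∀ y ∈ (line.drop (i + 1)).head?, Rg s x y := by
    by_cases h3 : 0 < i ∧ i < line.length - 1
    · rw [if_pos h3, takeGetLast_eq line i h3.1 (by omega), List.head?_drop,
        List.getElem?_eq_getElem (by omega), List.getElem?_eq_getElem (by omega : i + 1 < line.length)]
      rw [List.getD_eq_getElem line 0 (by omega : i + 1 < line.length),
        List.getD_eq_getElem line 0 (by omega : i - 1 < line.length)]
      simp [Rg]
    · rw [if_neg h3]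
      rcases Nat.lt_or_ge 0 i with h0 | h0
      · have : i + 1 ≥ line.length := by omega
        rw [List.head?_drop, List.getElem?_eq_none (by omega)]
        simp
      · rw [show i = 0 by omega]
        simp
  rw [hA, hB, hC]
  tauto

theorem alt_char (line : List Int) (s : Int) :
    altCheck line s = true ↔ ∃ k < line.length, List.IsChain (Rg s) (del line k) := by
  unfold altCheck
  simp only [List.any_eq_true, List.mem_range]
  constructor
  · rintro ⟨i, hi, h⟩
    exact ⟨i, hi, (alt_inner line s i hi).mp h⟩
  · rintro ⟨i, hi, h⟩
    exact ⟨i, hi, (alt_inner line s i hi).mpr h⟩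

theorem per_line (line : List Int) :
    aLoop line (PySem.List.pyRange 0 (line.length : Int) 1)
      = (altCheck line 1 || altCheck line (-1)) := by
  rw [Bool.eq_iff_iff, a_char, Bool.or_eq_true, alt_char, alt_char]
  constructor
  · rintro ⟨k, hk, h | h⟩
    · exact Or.inl ⟨k, hk, h⟩
    · exact Or.inr ⟨k, hk, h⟩
  · rintro (⟨k, hk, h⟩ | ⟨k, hk, h⟩)
    · exact ⟨k, hk, Or.inl h⟩
    · exact ⟨k, hk, Or.inr h⟩

-- ===== VERDICT (by name: the statement is the Claim_ definition above) =====
theorem safety_check_2_spec : Claim_equal_safety_check_2 := by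
  intro lines _
  unfold Spec_safety_check_2 safety_check_2 safety_check_2_alt
  have : ∀ line : List Int,
      aLoop line (PySem.List.pyRange 0 (line.length : Int) 1)
        = (altCheck line 1 || altCheck line (-1)) := per_line
  calc lines.foldl (fun count line =>
          if aLoop line (PySem.List.pyRange 0 (line.length : Int) 1) then count + 1 else count) 0
      = lines.foldl (fun count line =>
          if (altCheck line 1 || altCheck line (-1)) then count + 1 else count) 0 := by
        congr 1; funext count line; rw [this]
    _ = 0 + ((lines.countP (fun line => altCheck line 1 || altCheck line (-1)) : Nat) : Int) :=
        PySem.List.foldl_count_if _ lines 0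
    _ = _ := by ring
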